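-- pv_equiv track=rewrite | github.com/yaesoubilab/SimPy | SimPy/InOutFunctions.py | _rows_to_cols
-- ===== SOURCE A (Python) =====
-- def _rows_to_cols(rows, n_cols):
--
--     # initialize the list to store column values
--     cols = []
--     for j in range(0, n_cols):
--         cols.append([])
--
--     # read columns
--     for row in rows:
--         if len(row) != n_cols:
--             raise ValueError('All rows should have the same length.')
--
--         for j in range(0, n_cols):
--             cols[j].append(row[j])
--
--     return cols
-- ===== SOURCE B (Python) =====
-- def _rows_to_cols(rows, n_cols):
--     # two passes: validate all rows first, then build column-major with a nested comprehension
--     rows = list(rows)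
--     if any(len(row) != n_cols for row in rows):
--         raise ValueError('All rows should have the same length.')
--     return [[row[j] for row in rows] for j in range(n_cols)]
-- ===== Notes on version B (the rewrite author's own statement) =====
-- stated objective: simpler
-- what changed: A interleaves validation with a row-major scatter into pre-built column accumulators; B validates in one pass and then builds the transpose column-major with a nested comprehension (outer loop over columns).
import Mathlib
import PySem

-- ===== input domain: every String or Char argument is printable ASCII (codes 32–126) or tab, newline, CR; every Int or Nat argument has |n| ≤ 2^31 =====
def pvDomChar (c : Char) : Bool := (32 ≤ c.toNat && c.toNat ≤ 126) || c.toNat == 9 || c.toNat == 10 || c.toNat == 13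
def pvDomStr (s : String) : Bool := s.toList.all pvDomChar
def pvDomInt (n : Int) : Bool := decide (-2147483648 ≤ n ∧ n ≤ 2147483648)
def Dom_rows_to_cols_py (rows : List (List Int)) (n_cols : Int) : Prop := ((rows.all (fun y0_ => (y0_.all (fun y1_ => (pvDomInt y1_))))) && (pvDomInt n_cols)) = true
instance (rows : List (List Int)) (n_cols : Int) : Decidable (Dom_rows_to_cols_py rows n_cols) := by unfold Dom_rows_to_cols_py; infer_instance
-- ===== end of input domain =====

-- B replaces A's interleaved validation + row-major scatter into pre-built column
-- accumulators by a separate validation pass followed by a column-major nested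
-- comprehension (objective: simpler).

-- ===== PORT A =====
-- cols[j].append(x)  ==  cols = cols with element j replaced by cols[j] ++ [x]
def pvAppendAt (c : List (List Int)) (j : Nat) (x : Int) : List (List Int) :=
  c.set j (c.getD j [] ++ [x])

def rows_to_cols_py (rows : List (List Int)) (n_cols : Int) : List (List Int) :=
  -- cols = []; for j in range(0, n_cols): cols.append([])
  let cols := (PySem.List.pyRange 0 n_cols 1).foldl (fun c _ => c ++ [([] : List Int)]) []
  -- for row in rows: (length check raises outside Pre_) for j in range(0, n_cols): cols[j].append(row[j])
  rows.foldl (fun cols row =>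
    (PySem.List.pyRange 0 n_cols 1).foldl
      (fun c j => pvAppendAt c j.toNat (PySem.List.pyGetD row j 0)) cols) cols

-- ===== PORT B =====
def rows_to_cols_py_alt (rows : List (List Int)) (n_cols : Int) : List (List Int) :=
  -- (validation pass raises outside Pre_)
  -- [[row[j] for row in rows] for j in range(n_cols)]
  (PySem.List.pyRange 0 n_cols 1).map (fun j => rows.map (fun row => PySem.List.pyGetD row j 0))

-- ===== PRECONDITION & SPEC =====
-- Pre_ excludes exactly the inputs on which Python A raises ValueError: some row whose
-- length differs from n_cols.
def Pre_rows_to_cols_py (rows : List (List Int)) (n_cols : Int) : Prop :=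
  ∀ row ∈ rows, (row.length : Int) = n_cols

instance (rows : List (List Int)) (n_cols : Int) : Decidable (Pre_rows_to_cols_py rows n_cols) := by
  unfold Pre_rows_to_cols_py; infer_instance

def pvWitness_rows_to_cols_py : List (List Int) × Int := ([[1, 2], [3, 4], [5, 6]], 2)

def Spec_rows_to_cols_py (rows : List (List Int)) (n_cols : Int) (out : List (List Int)) : Prop := out = rows_to_cols_py_alt rows n_cols
instance (rows : List (List Int)) (n_cols : Int) (out : List (List Int)) : Decidable (Spec_rows_to_cols_py rows n_cols out) := by unfold Spec_rows_to_cols_py; infer_instance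

-- ===== CLAIM (what is proved, stated in full; the proofs are below) =====
def Claim_equal_rows_to_cols_py : Prop := ∀ (rows : List (List Int)) (n_cols : Int), Dom_rows_to_cols_py rows n_cols → Pre_rows_to_cols_py rows n_cols → Spec_rows_to_cols_py rows n_cols (rows_to_cols_py rows n_cols)

-- ===== LEMMAS AND PROOFS =====

theorem pv_getD_append {α : Type} (l : List α) (a : α) (t : List α) (d : α) {n : Nat} (h : l.length = n) :
    (l ++ a :: t).getD n d = a := by
  subst h
  induction l with
  | nil => rfl
  | cons x xs ih => simp [ih]

theorem pv_set_append {α : Type} (l : List α) (a b : α) (t : List α) {n : Nat} (h : l.length = n) :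
    (l ++ a :: t).set n b = l ++ b :: t := by
  subst h
  induction l with
  | nil => rfl
  | cons x xs ih => simp [ih]

theorem pv_init_fold (l : List Int) (init : List (List Int)) :
    l.foldl (fun c _ => c ++ [([] : List Int)]) init = init ++ List.replicate l.length [] := by
  induction l generalizing init with
  | nil => simp
  | cons x xs ih =>
    rw [List.foldl_cons, ih]
    simp [List.replicate_succ, List.append_assoc]

theorem pv_inner (x : Nat → Int) (m : Nat) :
    ∀ (g : Nat → List Int) (tail : List (List Int)),
      (List.range m).foldl (fun c j => pvAppendAt c j (x j)) ((List.range m).map g ++ tail)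
        = (List.range m).map (fun j => g j ++ [x j]) ++ tail := by
  induction m with
  | zero => intro g tail; simp
  | succ m ih =>
    intro g tail
    have h1 : (List.range (m + 1)).map g ++ tail
        = (List.range m).map g ++ (g m :: tail) := by
      simp [List.range_succ]
    rw [h1, List.range_succ, List.foldl_append]
    rw [ih g (g m :: tail)]
    have hlen : ((List.range m).map (fun j => g j ++ [x j])).length = m := by simp
    show pvAppendAt ((List.range m).map (fun j => g j ++ [x j]) ++ g m :: tail) m (x m) = _
    unfold pvAppendAt
    rw [pv_getD_append _ _ _ _ hlen, pv_set_append _ _ _ _ hlen]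
    simp

theorem pv_outer (m : Nat) (xr : List Int → Nat → Int) :
    ∀ (rows : List (List Int)) (g : Nat → List Int),
      rows.foldl (fun cols row =>
          (List.range m).foldl (fun c j => pvAppendAt c j (xr row j)) cols)
        ((List.range m).map g)
        = (List.range m).map (fun j => g j ++ rows.map (fun row => xr row j)) := by
  intro rows
  induction rows with
  | nil => intro g; simp
  | cons row rest ih =>
    intro g
    have h := pv_inner (xr row) m g []
    simp only [List.append_nil] at h
    simp only [List.foldl_cons, h, ih]
    simp [List.append_assoc]

theorem pv_main (rows : List (List Int)) (m : Nat) :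
    rows.foldl (fun cols row =>
        ((List.range m).map (fun k : Nat => (k : Int))).foldl
          (fun c j => pvAppendAt c j.toNat (PySem.List.pyGetD row j 0)) cols)
      (((List.range m).map (fun k : Nat => (k : Int))).foldl (fun c _ => c ++ [([] : List Int)]) [])
    = ((List.range m).map (fun k : Nat => (k : Int))).map
        (fun j => rows.map (fun row => PySem.List.pyGetD row j 0)) := by
  have hfold : ∀ (cols : List (List Int)) (row : List Int),
      ((List.range m).map (fun k : Nat => (k : Int))).foldl
        (fun c j => pvAppendAt c j.toNat (PySem.List.pyGetD row j 0)) cols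
      = (List.range m).foldl
        (fun c j => pvAppendAt c j (PySem.List.pyGetD row (j : Int) 0)) cols := by
    intro cols row
    rw [List.foldl_map]
    simp
  simp only [hfold]
  rw [pv_init_fold]
  simp only [List.length_map, List.length_range, List.nil_append]
  have hrep : List.replicate m ([] : List Int) = (List.range m).map (fun _ => ([] : List Int)) := by
    simp
  rw [hrep, pv_outer m (fun row j => PySem.List.pyGetD row (j : Int) 0) rows (fun _ => [])]
  simp [List.map_map]

-- ===== VERDICT (by name: the statement is the Claim_ definition above) =====
theorem rows_to_cols_py_spec : Claim_equal_rows_to_cols_py := by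
  intro rows n_cols _ _
  unfold Spec_rows_to_cols_py
  simp only [rows_to_cols_py, rows_to_cols_py_alt]
  rw [PySem.List.pyRange_one]
  simp only [Int.sub_zero, Int.zero_add]
  exact pv_main rows n_cols.toNat
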